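-- pv_equiv track=rewrite | github.com/adixon02/AutoHVAC | backend/services/gpt_classifier.py | fallback_regex_classification
-- ===== SOURCE A (Python) =====
-- def fallback_regex_classification(ocr_text: str) -> str:
--     """
--     Fallback classification using regex patterns
--     Used when GPT fails or times out
--     """
--     text = ocr_text.upper()
--
--     # Simple pattern matching
--     if any(x in text for x in ["BED", "BR", "BDRM"]):
--         return "bedroom"
--     elif any(x in text for x in ["BATH", "BA", "BTH"]):
--         return "bathroom"
--     elif any(x in text for x in ["KIT", "KITCHEN"]):
--         return "kitchen"
--     elif any(x in text for x in ["LIVING", "LR", "GREAT", "FAMILY"]):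
--         return "living"
--     elif any(x in text for x in ["DINING", "DIN"]):
--         return "dining"
--     elif any(x in text for x in ["GARAGE", "GAR"]):
--         return "garage"
--     elif any(x in text for x in ["CLOSET", "CLO", "CL"]):
--         return "closet"
--     elif any(x in text for x in ["HALL", "CORRIDOR"]):
--         return "hallway"
--     elif any(x in text for x in ["LAUNDRY", "WASH", "UTIL"]):
--         return "laundry"
--     elif any(x in text for x in ["OFFICE", "STUDY", "DEN"]):
--         return "office"
--     elif any(x in text for x in ["BONUS", "LOFT"]):
--         return "bonus"
--     elif any(x in text for x in ["PORCH", "DECK", "PATIO"]):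
--         return "porch"
--     elif any(x in text for x in ["STORAGE", "STOR"]):
--         return "storage"
--     elif any(x in text for x in ["MECH", "MECHANICAL", "FURNACE"]):
--         return "mechanical"
--     else:
--         return "other"
-- ===== SOURCE B (Python) =====
-- # Flat keyword table: (keyword, priority, label); priorities are nondecreasing.
-- # Single pass keeps the lowest-priority match (strict '<' keeps the earliest on ties),
-- # which reproduces the chain's first-group-wins behaviour.
-- KEYWORD_TABLE = [
--     ("BED", 0, "bedroom"), ("BR", 0, "bedroom"), ("BDRM", 0, "bedroom"),
--     ("BATH", 1, "bathroom"), ("BA", 1, "bathroom"), ("BTH", 1, "bathroom"),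
--     ("KIT", 2, "kitchen"), ("KITCHEN", 2, "kitchen"),
--     ("LIVING", 3, "living"), ("LR", 3, "living"), ("GREAT", 3, "living"), ("FAMILY", 3, "living"),
--     ("DINING", 4, "dining"), ("DIN", 4, "dining"),
--     ("GARAGE", 5, "garage"), ("GAR", 5, "garage"),
--     ("CLOSET", 6, "closet"), ("CLO", 6, "closet"), ("CL", 6, "closet"),
--     ("HALL", 7, "hallway"), ("CORRIDOR", 7, "hallway"),
--     ("LAUNDRY", 8, "laundry"), ("WASH", 8, "laundry"), ("UTIL", 8, "laundry"),
--     ("OFFICE", 9, "office"), ("STUDY", 9, "office"), ("DEN", 9, "office"),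
--     ("BONUS", 10, "bonus"), ("LOFT", 10, "bonus"),
--     ("PORCH", 11, "porch"), ("DECK", 11, "porch"), ("PATIO", 11, "porch"),
--     ("STORAGE", 12, "storage"), ("STOR", 12, "storage"),
--     ("MECH", 13, "mechanical"), ("MECHANICAL", 13, "mechanical"), ("FURNACE", 13, "mechanical"),
-- ]
--
--
-- def fallback_regex_classification(ocr_text: str) -> str:
--     text = ocr_text.upper()
--     best = None
--     for kw, pri, label in KEYWORD_TABLE:
--         if kw in text and (best is None or pri < best[0]):
--             best = (pri, label)
--     return best[1] if best is not None else "other"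
-- ===== Notes on version B (the rewrite author's own statement) =====
-- stated objective: alternative
-- what changed: Replaces the 14-branch first-match if/elif chain by a single pass over a flat prioritized keyword table that accumulates the minimum-priority matching keyword (no early return, no groups).
import Mathlib
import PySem

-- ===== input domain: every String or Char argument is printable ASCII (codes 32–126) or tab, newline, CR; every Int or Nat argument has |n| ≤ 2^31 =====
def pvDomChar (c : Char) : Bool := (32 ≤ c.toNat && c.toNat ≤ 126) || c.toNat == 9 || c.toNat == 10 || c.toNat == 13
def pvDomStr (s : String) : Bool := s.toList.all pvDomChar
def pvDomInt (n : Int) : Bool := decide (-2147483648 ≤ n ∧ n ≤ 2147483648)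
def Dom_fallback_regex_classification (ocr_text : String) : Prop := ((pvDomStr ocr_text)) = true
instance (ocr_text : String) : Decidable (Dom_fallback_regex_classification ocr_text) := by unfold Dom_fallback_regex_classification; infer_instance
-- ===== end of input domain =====

-- B replaces the 14-branch first-match if/elif chain by a single pass over a flat
-- prioritized keyword table accumulating the minimum-priority match (alternative).

-- ===== PORT A =====
def fallback_regex_classification (ocr_text : String) : String :=
  let text := PySem.Str.upper ocr_text
  if ["BED", "BR", "BDRM"].any (fun x => PySem.Str.isIn x text) then "bedroom"
  else if ["BATH", "BA", "BTH"].any (fun x => PySem.Str.isIn x text) then "bathroom"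
  else if ["KIT", "KITCHEN"].any (fun x => PySem.Str.isIn x text) then "kitchen"
  else if ["LIVING", "LR", "GREAT", "FAMILY"].any (fun x => PySem.Str.isIn x text) then "living"
  else if ["DINING", "DIN"].any (fun x => PySem.Str.isIn x text) then "dining"
  else if ["GARAGE", "GAR"].any (fun x => PySem.Str.isIn x text) then "garage"
  else if ["CLOSET", "CLO", "CL"].any (fun x => PySem.Str.isIn x text) then "closet"
  else if ["HALL", "CORRIDOR"].any (fun x => PySem.Str.isIn x text) then "hallway"
  else if ["LAUNDRY", "WASH", "UTIL"].any (fun x => PySem.Str.isIn x text) then "laundry"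
  else if ["OFFICE", "STUDY", "DEN"].any (fun x => PySem.Str.isIn x text) then "office"
  else if ["BONUS", "LOFT"].any (fun x => PySem.Str.isIn x text) then "bonus"
  else if ["PORCH", "DECK", "PATIO"].any (fun x => PySem.Str.isIn x text) then "porch"
  else if ["STORAGE", "STOR"].any (fun x => PySem.Str.isIn x text) then "storage"
  else if ["MECH", "MECHANICAL", "FURNACE"].any (fun x => PySem.Str.isIn x text) then "mechanical"
  else "other"

-- ===== PORT B =====
-- flat (keyword, priority, label) table, literal from Source B
def pvKeywordTable : List (String × Nat × String) :=
  [ ("BED", 0, "bedroom"), ("BR", 0, "bedroom"), ("BDRM", 0, "bedroom"),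
    ("BATH", 1, "bathroom"), ("BA", 1, "bathroom"), ("BTH", 1, "bathroom"),
    ("KIT", 2, "kitchen"), ("KITCHEN", 2, "kitchen"),
    ("LIVING", 3, "living"), ("LR", 3, "living"), ("GREAT", 3, "living"), ("FAMILY", 3, "living"),
    ("DINING", 4, "dining"), ("DIN", 4, "dining"),
    ("GARAGE", 5, "garage"), ("GAR", 5, "garage"),
    ("CLOSET", 6, "closet"), ("CLO", 6, "closet"), ("CL", 6, "closet"),
    ("HALL", 7, "hallway"), ("CORRIDOR", 7, "hallway"),
    ("LAUNDRY", 8, "laundry"), ("WASH", 8, "laundry"), ("UTIL", 8, "laundry"),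
    ("OFFICE", 9, "office"), ("STUDY", 9, "office"), ("DEN", 9, "office"),
    ("BONUS", 10, "bonus"), ("LOFT", 10, "bonus"),
    ("PORCH", 11, "porch"), ("DECK", 11, "porch"), ("PATIO", 11, "porch"),
    ("STORAGE", 12, "storage"), ("STOR", 12, "storage"),
    ("MECH", 13, "mechanical"), ("MECHANICAL", 13, "mechanical"), ("FURNACE", 13, "mechanical") ]

-- loop body: 'if kw in text and (best is None or pri < best[0]): best = (pri, label)'
def pvStep (text : String) (best : Option (Nat × String)) (e : String × Nat × String) :
    Option (Nat × String) :=
  if PySem.Str.isIn e.1 text &&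
      (match best with | none => true | some (q, _) => decide (e.2.1 < q)) then
    some (e.2.1, e.2.2)
  else best

def fallback_regex_classification_alt (ocr_text : String) : String :=
  let text := PySem.Str.upper ocr_text
  match pvKeywordTable.foldl (pvStep text) none with
  | some (_, label) => label
  | none => "other"

-- ===== PRECONDITION & SPEC =====
def Spec_fallback_regex_classification (ocr_text : String) (out : String) : Prop :=
  out = fallback_regex_classification_alt ocr_text
instance (ocr_text : String) (out : String) :
    Decidable (Spec_fallback_regex_classification ocr_text out) := by
  unfold Spec_fallback_regex_classification; infer_instance

-- ===== CLAIM =====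
def Claim_equal_fallback_regex_classification : Prop :=
  ∀ (ocr_text : String), Dom_fallback_regex_classification ocr_text →
    Spec_fallback_regex_classification ocr_text (fallback_regex_classification ocr_text)

-- ===== LEMMAS AND PROOFS =====

-- proof-side view of A: the grouped keyword list and its first match
def pvPatterns : List (List String × String) :=
  [ (["BED", "BR", "BDRM"], "bedroom"),
    (["BATH", "BA", "BTH"], "bathroom"),
    (["KIT", "KITCHEN"], "kitchen"),
    (["LIVING", "LR", "GREAT", "FAMILY"], "living"),
    (["DINING", "DIN"], "dining"),
    (["GARAGE", "GAR"], "garage"),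
    (["CLOSET", "CLO", "CL"], "closet"),
    (["HALL", "CORRIDOR"], "hallway"),
    (["LAUNDRY", "WASH", "UTIL"], "laundry"),
    (["OFFICE", "STUDY", "DEN"], "office"),
    (["BONUS", "LOFT"], "bonus"),
    (["PORCH", "DECK", "PATIO"], "porch"),
    (["STORAGE", "STOR"], "storage"),
    (["MECH", "MECHANICAL", "FURNACE"], "mechanical") ]

def pvFlat : Nat → List (List String × String) → List (String × Nat × String)
  | _, [] => []
  | p, (kws, l) :: rest => kws.map (fun k => (k, p, l)) ++ pvFlat (p + 1) rest

def pvFirstO (text : String) : Nat → List (List String × String) → Option (Nat × String)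
  | _, [] => none
  | p, (kws, l) :: rest =>
      if kws.any (fun k => PySem.Str.isIn k text) then some (p, l)
      else pvFirstO text (p + 1) rest

theorem pvFlat_prio (gs : List (List String × String)) :
    ∀ (p : Nat), ∀ e ∈ pvFlat p gs, p ≤ e.2.1 := by
  induction gs with
  | nil => intro p e h; simp [pvFlat] at h
  | cons g rest ih =>
      intro p e h
      obtain ⟨kws, l⟩ := g
      simp only [pvFlat, List.mem_append, List.mem_map] at h
      rcases h with ⟨k, _, rfl⟩ | h
      · exact le_refl p
      · exact Nat.le_of_succ_le (ih (p + 1) e h)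

theorem pvFoldl_skip (text : String) (q : Nat) (m : String)
    (L : List (String × Nat × String)) (h : ∀ e ∈ L, q ≤ e.2.1) :
    L.foldl (pvStep text) (some (q, m)) = some (q, m) := by
  induction L with
  | nil => rfl
  | cons e rest ih =>
      have hq : ¬ e.2.1 < q := Nat.not_lt.mpr (h e (List.mem_cons_self))
      simp only [List.foldl_cons, pvStep, hq, decide_false, Bool.and_false]
      exact ih (fun e' he' => h e' (List.mem_cons_of_mem _ he'))

theorem pvFoldl_group (text : String) (p : Nat) (l : String) (kws : List String)
    (rest : List (String × Nat × String)) (hrest : ∀ e ∈ rest, p + 1 ≤ e.2.1) :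
    (kws.map (fun k => (k, p, l)) ++ rest).foldl (pvStep text) none =
      (if kws.any (fun k => PySem.Str.isIn k text) then some (p, l)
       else rest.foldl (pvStep text) none) := by
  induction kws with
  | nil => simp
  | cons k ks ih =>
      by_cases hk : PySem.Str.isIn k text = true
      · simp only [List.map_cons, List.cons_append, List.foldl_cons, pvStep,
          Bool.and_true, if_true, List.any_cons, hk, Bool.true_or, if_true]
        rw [List.foldl_append]
        have h1 : (ks.map (fun k => (k, p, l))).foldl (pvStep text) (some (p, l)) =
            some (p, l) := by
          apply pvFoldl_skip
          intro e he
          simp only [List.mem_map] at he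
          obtain ⟨k', _, rfl⟩ := he
          exact le_refl p
        rw [h1]
        exact pvFoldl_skip text p l rest (fun e he => Nat.le_of_succ_le (hrest e he))
      · simp only [Bool.not_eq_true] at hk
        simp only [List.map_cons, List.cons_append, List.foldl_cons, pvStep,
          Bool.false_and, List.any_cons, hk, Bool.false_or]
        exact ih

theorem pvFoldl_flat (text : String) (gs : List (List String × String)) :
    ∀ (p : Nat), (pvFlat p gs).foldl (pvStep text) none = pvFirstO text p gs := by
  induction gs with
  | nil => intro p; rfl
  | cons g rest ih =>
      intro p
      obtain ⟨kws, l⟩ := g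
      simp only [pvFlat, pvFirstO]
      rw [pvFoldl_group text p l kws (pvFlat (p + 1) rest) (pvFlat_prio rest (p + 1))]
      split
      · rfl
      · exact ih (p + 1)

theorem pvFirstO_cons (text : String) (p : Nat) (kws : List String) (l : String)
    (rest : List (List String × String)) :
    (match pvFirstO text p ((kws, l) :: rest) with
      | some (_, label) => label
      | none => "other") =
    (if kws.any (fun k => PySem.Str.isIn k text) then l
     else (match pvFirstO text (p + 1) rest with
       | some (_, label) => label
       | none => "other")) := by
  simp only [pvFirstO]
  split_ifs <;> rfl

theorem pvTable_eq : pvKeywordTable = pvFlat 0 pvPatterns := by rfl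

theorem pvMain (text : String) :
    (if ["BED", "BR", "BDRM"].any (fun x => PySem.Str.isIn x text) then "bedroom"
     else if ["BATH", "BA", "BTH"].any (fun x => PySem.Str.isIn x text) then "bathroom"
     else if ["KIT", "KITCHEN"].any (fun x => PySem.Str.isIn x text) then "kitchen"
     else if ["LIVING", "LR", "GREAT", "FAMILY"].any (fun x => PySem.Str.isIn x text) then "living"
     else if ["DINING", "DIN"].any (fun x => PySem.Str.isIn x text) then "dining"
     else if ["GARAGE", "GAR"].any (fun x => PySem.Str.isIn x text) then "garage"
     else if ["CLOSET", "CLO", "CL"].any (fun x => PySem.Str.isIn x text) then "closet"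
     else if ["HALL", "CORRIDOR"].any (fun x => PySem.Str.isIn x text) then "hallway"
     else if ["LAUNDRY", "WASH", "UTIL"].any (fun x => PySem.Str.isIn x text) then "laundry"
     else if ["OFFICE", "STUDY", "DEN"].any (fun x => PySem.Str.isIn x text) then "office"
     else if ["BONUS", "LOFT"].any (fun x => PySem.Str.isIn x text) then "bonus"
     else if ["PORCH", "DECK", "PATIO"].any (fun x => PySem.Str.isIn x text) then "porch"
     else if ["STORAGE", "STOR"].any (fun x => PySem.Str.isIn x text) then "storage"
     else if ["MECH", "MECHANICAL", "FURNACE"].any (fun x => PySem.Str.isIn x text) then "mechanical"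
     else "other") =
    (match pvKeywordTable.foldl (pvStep text) none with
      | some (_, label) => label
      | none => "other") := by
  rw [pvTable_eq, pvFoldl_flat]
  simp only [pvPatterns]
  repeat rw [pvFirstO_cons]
  rfl

-- ===== VERDICT =====
theorem fallback_regex_classification_spec : Claim_equal_fallback_regex_classification := by
  intro ocr_text _
  exact pvMain (PySem.Str.upper ocr_text)
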